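-- pv_equiv track=rewrite | github.com/SuryaTejaswi1/RetrieverBot_Capstone | intenthandler.py | get_parent_intent
-- ===== SOURCE A (Python) =====
-- def get_parent_intent(intent_name):
--     """
--     Returns the parent intent for a given intent. If the intent is a parent intent, returns itself.
--     """
--     # Intent mapping dictionary
--     intent_mapping = {
--         "Get_Course_info": {
--             "sub_intents": [
--                 "Get_Course_info - custom"
--             ]
--         },
--         "Get_CPT_OPT_Info": {
--             "sub_intents": [
--                 "Get_CPT_Application_Process",
--                 "Get_CPT_OPT_Documents",
--                 "Get_OPT_Application_Process",
--                 "Get_CPT_Eligibility",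
--                 "Get_OPT_Eligibility"
--             ]
--         },
--         "Get_General_Info": {
--             "sub_intents": [
--                 "Get_General_Info - custom"
--             ]
--         },
--         "Get_Research_Info": {
--             "sub_intents": [
--                 "Get_Research_Faculty_Info",
--                 "Get_Research_Info - custom"
--             ]
--         }
--     }
--
--     # Iterate through the mapping to find the parent intent
--     for parent_intent, details in intent_mapping.items():
--         if intent_name == parent_intent or intent_name in details["sub_intents"]:
--             return parent_intent
--
--     # If no match is found, return None
--     return intent_name
-- ===== SOURCE B (Python) =====
-- def get_parent_intent(intent_name):
--     """
--     Returns the parent intent for a given intent. If the intent is a parent intent, returns itself.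
--     """
--     # Flat reverse-lookup table: every sub-intent (and each parent itself) -> parent
--     reverse = {
--         "Get_Course_info": "Get_Course_info",
--         "Get_Course_info - custom": "Get_Course_info",
--         "Get_CPT_OPT_Info": "Get_CPT_OPT_Info",
--         "Get_CPT_Application_Process": "Get_CPT_OPT_Info",
--         "Get_CPT_OPT_Documents": "Get_CPT_OPT_Info",
--         "Get_OPT_Application_Process": "Get_CPT_OPT_Info",
--         "Get_CPT_Eligibility": "Get_CPT_OPT_Info",
--         "Get_OPT_Eligibility": "Get_CPT_OPT_Info",
--         "Get_General_Info": "Get_General_Info",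
--         "Get_General_Info - custom": "Get_General_Info",
--         "Get_Research_Info": "Get_Research_Info",
--         "Get_Research_Faculty_Info": "Get_Research_Info",
--         "Get_Research_Info - custom": "Get_Research_Info",
--     }
--     return reverse.get(intent_name, intent_name)
-- ===== Notes on version B (the rewrite author's own statement) =====
-- stated objective: idiomatic
-- what changed: Replaces the loop over the nested parent->sub_intents structure (with list-membership scans) by a single flat reverse-lookup dict and one .get with the name itself as default.
import Mathlib
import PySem

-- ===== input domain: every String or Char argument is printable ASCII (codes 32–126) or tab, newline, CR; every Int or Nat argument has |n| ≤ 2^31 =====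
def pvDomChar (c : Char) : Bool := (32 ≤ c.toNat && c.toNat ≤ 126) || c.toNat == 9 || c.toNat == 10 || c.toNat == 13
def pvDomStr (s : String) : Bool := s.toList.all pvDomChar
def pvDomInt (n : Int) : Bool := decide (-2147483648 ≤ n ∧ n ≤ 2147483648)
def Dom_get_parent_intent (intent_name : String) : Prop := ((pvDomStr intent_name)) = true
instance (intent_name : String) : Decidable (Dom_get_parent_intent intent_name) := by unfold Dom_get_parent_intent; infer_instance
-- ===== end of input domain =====

-- B replaces the loop over the nested intent map by a flat reverse-lookup dict with a single .get(name, name); idiomatic, same result.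


-- ===== PORT A =====
-- A's dict values are {"sub_intents": [...]}: only the sub_intents list is ever read, so each
-- value is ported as its sub-intent list (the dict around it carries no other data).
def pvIntentMapping : List (String × List String) :=
  [ ("Get_Course_info", ["Get_Course_info - custom"]),
    ("Get_CPT_OPT_Info",
      [ "Get_CPT_Application_Process", "Get_CPT_OPT_Documents",
        "Get_OPT_Application_Process", "Get_CPT_Eligibility", "Get_OPT_Eligibility" ]),
    ("Get_General_Info", ["Get_General_Info - custom"]),
    ("Get_Research_Info", ["Get_Research_Faculty_Info", "Get_Research_Info - custom"]) ]

-- the 'for parent_intent, details in intent_mapping.items():' loop with its early return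
def pvFindParent (intent_name : String) : List (String × List String) → String
  | [] => intent_name
  | (parent, subs) :: rest =>
      if intent_name = parent ∨ intent_name ∈ subs then parent
      else pvFindParent intent_name rest

def get_parent_intent (intent_name : String) : String :=
  pvFindParent intent_name pvIntentMapping

-- ===== PORT B =====
def pvReverse : PySem.Dict String String :=
  PySem.Dict.ofList
    [ ("Get_Course_info", "Get_Course_info"),
      ("Get_Course_info - custom", "Get_Course_info"),
      ("Get_CPT_OPT_Info", "Get_CPT_OPT_Info"),
      ("Get_CPT_Application_Process", "Get_CPT_OPT_Info"),
      ("Get_CPT_OPT_Documents", "Get_CPT_OPT_Info"),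
      ("Get_OPT_Application_Process", "Get_CPT_OPT_Info"),
      ("Get_CPT_Eligibility", "Get_CPT_OPT_Info"),
      ("Get_OPT_Eligibility", "Get_CPT_OPT_Info"),
      ("Get_General_Info", "Get_General_Info"),
      ("Get_General_Info - custom", "Get_General_Info"),
      ("Get_Research_Info", "Get_Research_Info"),
      ("Get_Research_Faculty_Info", "Get_Research_Info"),
      ("Get_Research_Info - custom", "Get_Research_Info") ]

def get_parent_intent_alt (intent_name : String) : String :=
  PySem.Dict.getD pvReverse intent_name intent_name

-- ===== PRECONDITION & SPEC =====
def Spec_get_parent_intent (intent_name : String) (out : String) : Prop := out = get_parent_intent_alt intent_name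
instance (intent_name : String) (out : String) : Decidable (Spec_get_parent_intent intent_name out) := by unfold Spec_get_parent_intent; infer_instance

-- ===== CLAIM (what is proved, stated in full; the proofs are below) =====
def Claim_equal_get_parent_intent : Prop := ∀ (intent_name : String), Dom_get_parent_intent intent_name → Spec_get_parent_intent intent_name (get_parent_intent intent_name)

-- ===== LEMMAS AND PROOFS =====

-- ===== VERDICT (by name: the statement is the Claim_ definition above) =====
-- pvReverse's keys are pairwise distinct, so building it by updates yields the literal item list
theorem pvReverse_eq : pvReverse = PySem.Dict.mk
    [ ("Get_Course_info", "Get_Course_info"),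
      ("Get_Course_info - custom", "Get_Course_info"),
      ("Get_CPT_OPT_Info", "Get_CPT_OPT_Info"),
      ("Get_CPT_Application_Process", "Get_CPT_OPT_Info"),
      ("Get_CPT_OPT_Documents", "Get_CPT_OPT_Info"),
      ("Get_OPT_Application_Process", "Get_CPT_OPT_Info"),
      ("Get_CPT_Eligibility", "Get_CPT_OPT_Info"),
      ("Get_OPT_Eligibility", "Get_CPT_OPT_Info"),
      ("Get_General_Info", "Get_General_Info"),
      ("Get_General_Info - custom", "Get_General_Info"),
      ("Get_Research_Info", "Get_Research_Info"),
      ("Get_Research_Faculty_Info", "Get_Research_Info"),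
      ("Get_Research_Info - custom", "Get_Research_Info") ] := by decide

set_option maxHeartbeats 1000000 in
theorem get_parent_intent_spec : Claim_equal_get_parent_intent := by
  intro s _
  unfold Spec_get_parent_intent
  by_cases hmem : s ∈ ["Get_Course_info", "Get_Course_info - custom", "Get_CPT_OPT_Info", "Get_CPT_Application_Process", "Get_CPT_OPT_Documents", "Get_OPT_Application_Process", "Get_CPT_Eligibility", "Get_OPT_Eligibility", "Get_General_Info", "Get_General_Info - custom", "Get_Research_Info", "Get_Research_Faculty_Info", "Get_Research_Info - custom"]
  · -- s is one of the 13 known names: substitute and evaluate both ports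
    simp only [List.mem_cons, List.not_mem_nil, or_false] at hmem
    rcases hmem with rfl|rfl|rfl|rfl|rfl|rfl|rfl|rfl|rfl|rfl|rfl|rfl|rfl <;> decide
  · -- s matches no key and no sub-intent: both ports fall through to s itself
    simp only [List.mem_cons, List.not_mem_nil, not_or, or_false] at hmem
    obtain ⟨h1, h2, h3, h4, h5, h6, h7, h8, h9, h10, h11, h12, h13⟩ := hmem
    have g1 : ("Get_Course_info" == s) = false := beq_eq_false_iff_ne.mpr (fun h => h1 h.symm)
    have g2 : ("Get_Course_info - custom" == s) = false := beq_eq_false_iff_ne.mpr (fun h => h2 h.symm)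
    have g3 : ("Get_CPT_OPT_Info" == s) = false := beq_eq_false_iff_ne.mpr (fun h => h3 h.symm)
    have g4 : ("Get_CPT_Application_Process" == s) = false := beq_eq_false_iff_ne.mpr (fun h => h4 h.symm)
    have g5 : ("Get_CPT_OPT_Documents" == s) = false := beq_eq_false_iff_ne.mpr (fun h => h5 h.symm)
    have g6 : ("Get_OPT_Application_Process" == s) = false := beq_eq_false_iff_ne.mpr (fun h => h6 h.symm)
    have g7 : ("Get_CPT_Eligibility" == s) = false := beq_eq_false_iff_ne.mpr (fun h => h7 h.symm)
    have g8 : ("Get_OPT_Eligibility" == s) = false := beq_eq_false_iff_ne.mpr (fun h => h8 h.symm)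
    have g9 : ("Get_General_Info" == s) = false := beq_eq_false_iff_ne.mpr (fun h => h9 h.symm)
    have g10 : ("Get_General_Info - custom" == s) = false := beq_eq_false_iff_ne.mpr (fun h => h10 h.symm)
    have g11 : ("Get_Research_Info" == s) = false := beq_eq_false_iff_ne.mpr (fun h => h11 h.symm)
    have g12 : ("Get_Research_Faculty_Info" == s) = false := beq_eq_false_iff_ne.mpr (fun h => h12 h.symm)
    have g13 : ("Get_Research_Info - custom" == s) = false := beq_eq_false_iff_ne.mpr (fun h => h13 h.symm)
    unfold get_parent_intent get_parent_intent_alt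
    rw [pvReverse_eq]
    simp only [pvIntentMapping, pvFindParent, PySem.Dict.getD, PySem.Dict.get?_mk_cons,
      List.mem_cons, List.not_mem_nil,
      h1, h2, h3, h4, h5, h6, h7, h8, h9, h10, h11, h12, h13,
      g1, g2, g3, g4, g5, g6, g7, g8, g9, g10, g11, g12, g13,
      or_self, or_false, if_false, Bool.false_eq_true]
    simp [PySem.Dict.get?]
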